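-- pv_equiv track=rewrite | github.com/nibtehaz/SSG-LUGIA | codes/utils.py | getGenomicIslands
-- ===== SOURCE A (Python) =====
-- def getGenomicIslands(label):
--     """
--     Extracts the genomics islands from the label
--
--     Arguments:
--         label {list} -- predicted label
--
--     Returns:
--         list of tuples -- list of genomic islands
--     """
--
--     gi_islands = []                 # genomic islands
--
--     st_island = -1
--
--
--     for i in (range(len(label))):
--
--         pt = label[i][0]
--
--         if(pt>0):
--             if(st_island==-1):
--                 st_island = i
--             else:
--                 pass
--
--         else:
--             if(st_island != -1):
--                 en_island = i-1
--
--                 gi_islands.append((st_island+1,en_island))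
--
--                 st_island = -1
--
--             else:
--                 pass
--
--     if(st_island != -1):
--         en_island = len(label)-1
--
--         gi_islands.append((st_island+1,en_island))
--
--
--     return gi_islands
-- ===== SOURCE B (Python) =====
-- def getGenomicIslands(label):
--     flags = [row[0] > 0 for row in label]
--     res = []
--     i = 0
--     n = len(flags)
--     while i < n:
--         j = i
--         while j < n and flags[j] == flags[i]:
--             j += 1
--         if flags[i]:
--             res.append((i + 1, j - 1))
--         i = j
--     return res
-- ===== Notes on version B (the rewrite author's own statement) =====
-- stated objective: alternative
-- what changed: Replaced A's sentinel state machine (st_island flag carried through the loop plus a post-loop flush) by a two-pointer run scan over a precomputed positivity list: an inner pointer advances to the end of each maximal run of equal flags, positive runs are emitted immediately, and no flush is needed.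
import Mathlib
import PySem

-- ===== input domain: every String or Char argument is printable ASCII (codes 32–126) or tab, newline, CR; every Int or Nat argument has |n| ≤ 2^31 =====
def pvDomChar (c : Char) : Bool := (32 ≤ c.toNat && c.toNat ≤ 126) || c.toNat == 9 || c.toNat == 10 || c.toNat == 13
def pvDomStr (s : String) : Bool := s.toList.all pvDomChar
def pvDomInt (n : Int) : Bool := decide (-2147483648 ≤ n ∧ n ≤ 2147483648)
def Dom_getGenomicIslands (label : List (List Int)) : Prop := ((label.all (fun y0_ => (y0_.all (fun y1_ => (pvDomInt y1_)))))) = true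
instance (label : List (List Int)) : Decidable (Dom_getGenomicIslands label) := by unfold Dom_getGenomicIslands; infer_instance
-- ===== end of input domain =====

-- B replaces A's sentinel state machine (st_island flag + post-loop flush) by a two-pointer
-- run scan over a precomputed positivity list (objective: alternative; same cost).

-- ===== PORT A =====
-- A's loop body: pt = label[i][0]; the sentinel st_island is acc.2 (-1 = outside an island).
def aStep (acc : List (Int × Int) × Int) (i : Int) (row : List Int) : List (Int × Int) × Int :=
  let pt := PySem.List.pyGetD row 0 0
  if pt > 0 then
    if acc.2 = -1 then (acc.1, i) else acc
  else
    if acc.2 ≠ -1 then (acc.1 ++ [(acc.2 + 1, i - 1)], -1) else acc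

def getGenomicIslands (label : List (List Int)) : List (Int × Int) :=
  let n : Int := PySem.List.len label
  let s := (PySem.List.pyRange 0 n 1).foldl
    (fun acc i => aStep acc i (PySem.List.pyGetD label i [])) ([], -1)
  if s.2 ≠ -1 then s.1 ++ [(s.2 + 1, n - 1)] else s.1

-- ===== PORT B =====
-- flags[k] = (label[k][0] > 0)
def bFlag (row : List Int) : Bool := decide (0 < PySem.List.pyGetD row 0 0)

-- inner while: advance j while j < n and flags[j] == f
def bAdvance (flags : List Bool) (f : Bool) (j : Nat) : Nat :=
  if h : j < flags.length then
    if flags[j] == f then bAdvance flags f (j + 1) else j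
  else j
  termination_by flags.length - j

-- termination facts for the outer while loop (cited by bMain's decreasing_by)
theorem bAdvance_le (flags : List Bool) (f : Bool) (j : Nat) : j ≤ bAdvance flags f j := by
  fun_induction bAdvance <;> omega

theorem bAdvance_lt (flags : List Bool) (f : Bool) (j : Nat)
    (h : j < flags.length) (hf : flags[j] = f) : j < bAdvance flags f j := by
  rw [bAdvance]
  simp only [h, dif_pos, hf, BEq.rfl, if_pos]
  have := bAdvance_le flags f (j + 1)
  omega

-- outer while: emit each maximal run of equal flags, keeping only the positive runs
def bMain (flags : List Bool) (i : Nat) (res : List (Int × Int)) : List (Int × Int) :=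
  if h : i < flags.length then
    let j := bAdvance flags flags[i] i
    bMain flags j (if flags[i] then res ++ [((i : Int) + 1, (j : Int) - 1)] else res)
  else res
  termination_by flags.length - i
  decreasing_by
    have := bAdvance_lt flags flags[i] i h rfl
    omega

def getGenomicIslands_alt (label : List (List Int)) : List (Int × Int) :=
  bMain (label.map bFlag) 0 []

-- ===== PRECONDITION & SPEC =====
-- Pre_ excludes labels containing an empty row: there Python A raises IndexError on label[i][0].
def Pre_getGenomicIslands (label : List (List Int)) : Prop := ∀ row ∈ label, row ≠ []
instance (label : List (List Int)) : Decidable (Pre_getGenomicIslands label) := by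
  unfold Pre_getGenomicIslands; infer_instance

def pvWitness_getGenomicIslands : List (List Int) := [[1], [0], [2], [3]]

def Spec_getGenomicIslands (label : List (List Int)) (out : List (Int × Int)) : Prop := out = getGenomicIslands_alt label
instance (label : List (List Int)) (out : List (Int × Int)) : Decidable (Spec_getGenomicIslands label out) := by unfold Spec_getGenomicIslands; infer_instance

-- ===== CLAIM (what is proved, stated in full; the proofs are below) =====
def Claim_equal_getGenomicIslands : Prop := ∀ (label : List (List Int)), Dom_getGenomicIslands label → Pre_getGenomicIslands label → Spec_getGenomicIslands label (getGenomicIslands label)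

-- ===== LEMMAS AND PROOFS =====

-- A's loop as a structural recursion over (index, row) pairs
def aGo : List (List Int) → Int → (List (Int × Int) × Int) → List (Int × Int) × Int
  | [], _, s => s
  | row :: rest, i, s => aGo rest (i + 1) (aStep s i row)

-- A's post-loop flush
def aFin (s : List (Int × Int) × Int) (n : Int) : List (Int × Int) :=
  if s.2 ≠ -1 then s.1 ++ [(s.2 + 1, n - 1)] else s.1

-- common denotation: the positive runs of a flag list whose first flag sits at absolute index i
def islands : List Bool → Int → List (Int × Int)
  | [], _ => []
  | b :: bs, i =>
    let k := (bs.takeWhile (· == b)).length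
    (if b then [(i + 1, i + 1 + (k : Int) - 1)] else []) ++ islands (bs.drop k) (i + 1 + (k : Int))
  termination_by fs _ => fs.length
  decreasing_by simp [List.length_drop]

theorem aGo_eq_foldl (xs : List (List Int)) : ∀ (i : Int) (s : List (Int × Int) × Int),
    (PySem.List.enumerate xs i).foldl (fun acc p => aStep acc p.1 p.2) s = aGo xs i s := by
  induction xs with
  | nil => intro i s; simp [PySem.List.enumerate_nil, aGo]
  | cons row rest ih => intro i s; simp [PySem.List.enumerate_cons, aGo, ih]

theorem islands_false_cons (bs : List Bool) (i : Int) :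
    islands (false :: bs) i = islands bs (i + 1) := by
  cases bs with
  | nil =>
    rw [islands]
    simp [islands]
  | cons b' bs' =>
    cases b' with
    | true => rw [islands]; simp [List.takeWhile]
    | false =>
      rw [islands, islands]
      simp only [List.takeWhile, BEq.rfl, List.length_cons, List.drop_succ_cons,
        Bool.false_eq_true, if_false, List.nil_append]
      congr 1
      push_cast
      ring

-- A-side invariant: A's state machine emits, island by island, exactly `islands`;
-- the left conjunct is the "outside an island" phase, the right one the "inside" phase.
theorem aGo_islands : ∀ (xs : List (List Int)),
    (∀ (i : Int) (gi : List (Int × Int)), 0 ≤ i →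
      aFin (aGo xs i (gi, -1)) (i + xs.length) = gi ++ islands (xs.map bFlag) i) ∧
    (∀ (i s : Int) (gi : List (Int × Int)), 0 ≤ i → 0 ≤ s →
      aFin (aGo xs i (gi, s)) (i + xs.length) =
        gi ++ [(s + 1, i + (((xs.map bFlag).takeWhile (· == true)).length : Int) - 1)] ++
          islands ((xs.map bFlag).drop ((xs.map bFlag).takeWhile (· == true)).length)
            (i + (((xs.map bFlag).takeWhile (· == true)).length : Int))) := by
  intro xs
  induction xs with
  | nil =>
    constructor
    · intro i gi _
      simp only [List.map_nil, List.length_nil]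
      rw [islands]
      simp [aGo, aFin]
    · intro i s gi hi hs
      simp [aGo, aFin, islands, show s ≠ -1 by omega]
  | cons row rest ih =>
    obtain ⟨ih1, ih2⟩ := ih
    have hlen : ∀ i : Int, i + ((rest.length + 1 : Nat) : Int) = (i + 1) + (rest.length : Int) := by
      intro i; push_cast; ring
    constructor
    · intro i gi hi
      simp only [aGo, List.map_cons, List.length_cons, hlen]
      cases hb : bFlag row
      · have hpt : ¬ (PySem.List.pyGetD row 0 0 > 0) := by simpa [bFlag] using hb
        rw [show aStep (gi, -1) i row = (gi, -1) by simp [aStep, hpt]]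
        rw [ih1 (i + 1) gi (by omega), islands_false_cons]
      · have hpt : PySem.List.pyGetD row 0 0 > 0 := by simpa [bFlag] using hb
        rw [show aStep (gi, -1) i row = (gi, i) by simp [aStep, hpt]]
        rw [ih2 (i + 1) i gi (by omega) hi]
        conv_rhs => rw [islands]
        simp only [List.append_assoc, if_true]
    · intro i s gi hi hs
      simp only [aGo, List.map_cons, List.length_cons, hlen]
      cases hb : bFlag row
      · have hpt : ¬ (PySem.List.pyGetD row 0 0 > 0) := by simpa [bFlag] using hb
        rw [show aStep (gi, s) i row = (gi ++ [(s + 1, i - 1)], -1) by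
              simp [aStep, hpt, show s ≠ -1 by omega]]
        rw [ih1 (i + 1) _ (by omega)]
        have ht : List.takeWhile (fun x => x == true) (false :: List.map bFlag rest) = [] := by
          simp [List.takeWhile]
        rw [ht]
        simp only [List.length_nil, Nat.cast_zero, add_zero, List.drop_zero, List.append_assoc]
        rw [islands_false_cons]
      · have hpt : PySem.List.pyGetD row 0 0 > 0 := by simpa [bFlag] using hb
        rw [show aStep (gi, s) i row = (gi, s) by simp [aStep, hpt, show ¬ s = -1 by omega]]
        rw [ih2 (i + 1) s gi (by omega) hs]
        simp [List.takeWhile, List.append_assoc]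
        ring_nf
        exact ⟨trivial, trivial⟩

-- B-side invariant: the inner while loop measures the current run …
theorem bAdvance_eq (flags : List Bool) (f : Bool) : ∀ (j : Nat),
    bAdvance flags f j = j + ((flags.drop j).takeWhile (· == f)).length := by
  intro j
  fun_induction bAdvance with
  | case1 j h hf ih =>
    rw [List.drop_eq_getElem_cons h]
    simp [List.takeWhile, hf, ih]
    omega
  | case2 j h hf =>
    rw [List.drop_eq_getElem_cons h]
    simp [List.takeWhile, hf]
  | case3 j h =>
    rw [List.drop_eq_nil_of_le (by omega)]
    simp

-- … and the outer loop emits exactly `islands` of the unscanned suffix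
theorem bMain_eq (flags : List Bool) : ∀ (m i : Nat) (res : List (Int × Int)),
    flags.length - i ≤ m → bMain flags i res = res ++ islands (flags.drop i) (i : Int) := by
  intro m
  induction m with
  | zero =>
    intro i res h
    rw [bMain, List.drop_eq_nil_of_le (by omega), islands]
    simp [Nat.not_lt.mpr (by omega : flags.length ≤ i)]
  | succ m ih =>
    intro i res h
    by_cases hi : i < flags.length
    · rw [bMain]
      simp only [hi, dif_pos]
      have hj : bAdvance flags flags[i] i
          = i + 1 + ((flags.drop (i + 1)).takeWhile (· == flags[i])).length := by
        rw [bAdvance_eq, List.drop_eq_getElem_cons hi]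
        simp [List.takeWhile]
        omega
      have hlt := bAdvance_lt flags flags[i] i hi rfl
      rw [ih _ _ (by omega)]
      conv_rhs => rw [List.drop_eq_getElem_cons hi, islands]
      rw [List.drop_drop, hj]
      cases flags[i] <;>
        simp only [if_true, if_false, Bool.false_eq_true, List.append_assoc] <;>
        push_cast <;> simp
    · rw [bMain, List.drop_eq_nil_of_le (by omega), islands]
      simp [hi]

-- ===== VERDICT (by name: the statement is the Claim_ definition above) =====
theorem getGenomicIslands_spec : Claim_equal_getGenomicIslands := by
  intro label _ _
  unfold Spec_getGenomicIslands getGenomicIslands getGenomicIslands_alt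
  rw [bMain_eq (label.map bFlag) (label.map bFlag).length 0 [] (by omega)]
  simp only [List.drop_zero, List.nil_append, Nat.cast_zero]
  have hA : (PySem.List.pyRange 0 (PySem.List.len label) 1).foldl
      (fun acc i => aStep acc i (PySem.List.pyGetD label i [])) ([], -1) = aGo label 0 ([], -1) := by
    rw [← aGo_eq_foldl, PySem.List.enumerate_eq_map_pyRange (d := []), List.foldl_map]
  have hA2 := (aGo_islands label).1 0 [] le_rfl
  simp only [zero_add, List.nil_append] at hA2
  show aFin ((PySem.List.pyRange 0 (PySem.List.len label) 1).foldl
      (fun acc i => aStep acc i (PySem.List.pyGetD label i [])) ([], -1)) (PySem.List.len label)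
      = islands (label.map bFlag) 0
  rw [hA, PySem.List.len_eq, hA2]
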